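-- pv_equiv track=rewrite | github.com/229196637/view2lua | parser/entry_data.py | _split_table_pairs
-- ===== SOURCE A (Python) =====
-- from typing import Dict, Any, List, Optional, Tuple
--
-- def _split_table_pairs(inner: str) -> List[str]:
--     """分割表中的键值对，考虑嵌套"""
--     pairs = []
--     current = []
--     brace_depth = 0
--
--     for char in inner:
--         if char == '{':
--             brace_depth += 1
--             current.append(char)
--         elif char == '}':
--             brace_depth -= 1
--             current.append(char)
--         elif char == ',' and brace_depth == 0:
--             pairs.append(''.join(current))
--             current = []
--         else:
--             current.append(char)
--
--     if current:
--         pairs.append(''.join(current))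
--
--     return pairs
-- ===== SOURCE B (Python) =====
-- def _split_table_pairs(inner: str):
--     """分割表中的键值对，考虑嵌套"""
--     # pass 1: record the index of every comma at brace depth 0
--     depth = 0
--     cuts = []
--     for i, char in enumerate(inner):
--         if char == '{':
--             depth += 1
--         elif char == '}':
--             depth -= 1
--         elif char == ',' and depth == 0:
--             cuts.append(i)
--     # pass 2: slice the string between consecutive boundaries
--     pairs = []
--     prev = 0
--     for cut in cuts:
--         pairs.append(inner[prev:cut])
--         prev = cut + 1
--     tail = inner[prev:]
--     if tail:
--         pairs.append(tail)
--     return pairs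
-- ===== Notes on version B (the rewrite author's own statement) =====
-- stated objective: alternative
-- what changed: Replaces A's character-accumulator single pass with a two-pass scheme: one scan records the indices of all depth-0 commas, a second pass builds each pair by slicing the string between consecutive boundaries.
import Mathlib
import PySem

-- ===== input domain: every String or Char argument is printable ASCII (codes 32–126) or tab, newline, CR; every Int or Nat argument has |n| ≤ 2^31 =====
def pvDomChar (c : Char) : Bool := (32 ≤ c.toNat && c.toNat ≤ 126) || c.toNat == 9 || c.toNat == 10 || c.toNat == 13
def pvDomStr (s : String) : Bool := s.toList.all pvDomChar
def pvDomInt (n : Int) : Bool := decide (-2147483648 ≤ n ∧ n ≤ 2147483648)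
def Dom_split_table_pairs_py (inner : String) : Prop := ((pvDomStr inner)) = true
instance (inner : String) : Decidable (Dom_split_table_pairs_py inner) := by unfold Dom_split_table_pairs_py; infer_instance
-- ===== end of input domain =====

-- B replaces A's character accumulator with a two-pass scheme (collect top-level comma
-- indices, then slice between boundaries); alternative decomposition, same O(n) cost.

-- ===== PORT A =====
-- loop body of A's single for-loop: state = (pairs, current, brace_depth)
def pvStepA (st : List String × List Char × Int) (c : Char) : List String × List Char × Int :=
  if c = '{' then (st.1, st.2.1 ++ [c], st.2.2 + 1)
  else if c = '}' then (st.1, st.2.1 ++ [c], st.2.2 - 1)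
  else if c = ',' ∧ st.2.2 = 0 then (st.1 ++ [String.ofList st.2.1], [], st.2.2)
  else (st.1, st.2.1 ++ [c], st.2.2)

-- A's trailing "if current: pairs.append(''.join(current))"
def pvFinA (st : List String × List Char × Int) : List String :=
  if st.2.1 ≠ [] then st.1 ++ [String.ofList st.2.1] else st.1

def split_table_pairs_py (inner : String) : List String :=
  pvFinA (inner.toList.foldl pvStepA ([], [], 0))

-- ===== PORT B =====
-- pass 1 body: state = (depth, cuts); collects indices of depth-0 commas
def pvStepB1 (st : Int × List Int) (p : Int × Char) : Int × List Int :=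
  if p.2 = '{' then (st.1 + 1, st.2)
  else if p.2 = '}' then (st.1 - 1, st.2)
  else if p.2 = ',' ∧ st.1 = 0 then (st.1, st.2 ++ [p.1])
  else (st.1, st.2)

-- pass 2 body: state = (prev, pairs); slices inner[prev:cut]
def pvStepB2 (cs : List Char) (st : Int × List String) (cut : Int) : Int × List String :=
  (cut + 1, st.2 ++ [String.ofList (PySem.List.slice cs (some st.1) (some cut))])

-- B's trailing "tail = inner[prev:]; if tail: pairs.append(tail)"
def pvFinB (cs : List Char) (st : Int × List String) : List String :=
  if PySem.List.slice cs (some st.1) none ≠ [] then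
    st.2 ++ [String.ofList (PySem.List.slice cs (some st.1) none)]
  else st.2

def split_table_pairs_py_alt (inner : String) : List String :=
  let cs := inner.toList
  let cuts := ((PySem.List.enumerate cs 0).foldl pvStepB1 (0, [])).2
  pvFinB cs (cuts.foldl (pvStepB2 cs) (0, []))

-- ===== PRECONDITION & SPEC =====
def Spec_split_table_pairs_py (inner : String) (out : List String) : Prop := out = split_table_pairs_py_alt inner
instance (inner : String) (out : List String) : Decidable (Spec_split_table_pairs_py inner out) := by unfold Spec_split_table_pairs_py; infer_instance

-- ===== CLAIM (what is proved, stated in full; the proofs are below) =====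
def Claim_equal_split_table_pairs_py : Prop := ∀ (inner : String), Dom_split_table_pairs_py inner → Spec_split_table_pairs_py inner (split_table_pairs_py inner)

-- ===== LEMMAS AND PROOFS =====

-- common characterisation: the segments of cs when the pending segment is cur at depth d
def pvSegs (cur : List Char) (d : Int) : List Char → List String
  | [] => if cur = [] then [] else [String.ofList cur]
  | c :: cs =>
    if c = '{' then pvSegs (cur ++ [c]) (d + 1) cs
    else if c = '}' then pvSegs (cur ++ [c]) (d - 1) cs
    else if c = ',' ∧ d = 0 then String.ofList cur :: pvSegs [] d cs
    else pvSegs (cur ++ [c]) d cs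

-- absolute indices (starting at j) of the depth-0 commas of cs at depth d
def pvCutsAbs : List Char → Int → Int → List Int
  | [], _, _ => []
  | c :: cs, j, d =>
    if c = '{' then pvCutsAbs cs (j + 1) (d + 1)
    else if c = '}' then pvCutsAbs cs (j + 1) (d - 1)
    else if c = ',' ∧ d = 0 then j :: pvCutsAbs cs (j + 1) d
    else pvCutsAbs cs (j + 1) d

lemma pvA_char (cs : List Char) : ∀ (pairs : List String) (cur : List Char) (d : Int),
    pvFinA (cs.foldl pvStepA (pairs, cur, d)) = pairs ++ pvSegs cur d cs := by
  induction cs with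
  | nil =>
    intro pairs cur d
    simp only [List.foldl_nil, pvFinA, pvSegs]
    split_ifs with h h' <;> simp_all
  | cons c cs ih =>
    intro pairs cur d
    simp only [List.foldl_cons, pvStepA, pvSegs]
    split_ifs with h1 h2 h3 <;> simp [ih]

lemma pvB1_char (cs : List Char) : ∀ (j d : Int) (acc : List Int),
    ((PySem.List.enumerate cs j).foldl pvStepB1 (d, acc)).2 = acc ++ pvCutsAbs cs j d := by
  induction cs with
  | nil => intro j d acc; simp [PySem.List.enumerate_nil, pvCutsAbs]
  | cons c cs ih =>
    intro j d acc
    rw [PySem.List.enumerate_cons, List.foldl_cons]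
    simp only [pvStepB1, pvCutsAbs]
    split_ifs with h1 h2 h3 <;> simp [ih]

lemma pvB2_char (full : List Char) : ∀ (cs : List Char) (prev start : Nat) (d : Int)
    (pairs : List String), cs = full.drop prev → start ≤ prev →
    pvFinB full (List.foldl (pvStepB2 full) (((start : Nat) : Int), pairs)
        (pvCutsAbs cs (prev : Int) d))
      = pairs ++ pvSegs ((full.drop start).take (prev - start)) d cs := by
  intro cs
  induction cs with
  | nil =>
    intro prev start d pairs hc hs
    have hlen : full.length ≤ prev := by
      by_contra h
      have := congrArg List.length hc
      simp [List.length_drop] at this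
      omega
    have htake : (full.drop start).take (prev - start) = full.drop start := by
      apply List.take_of_length_le
      simp [List.length_drop]; omega
    simp only [pvCutsAbs, List.foldl_nil, pvFinB, pvSegs,
      PySem.List.slice_from_natCast, htake]
    split_ifs with h h' <;> simp_all
  | cons c cs ih =>
    intro prev start d pairs hc hs
    have hprev : prev < full.length := by
      by_contra h
      rw [List.drop_eq_nil_of_le (by omega)] at hc
      simp at hc
    have hd1 : full.drop (prev + 1) = cs := by
      have : full.drop (prev + 1) = (full.drop prev).drop 1 := by
        rw [List.drop_drop]
      rw [this, ← hc]; rfl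
    have hget : full[prev] = c := by
      have h0 : (full.drop prev)[0]'(by rw [← hc]; simp) = c := by
        simp [← hc]
      rw [List.getElem_drop] at h0
      simpa using h0
    have hgrow : ∀ h : start ≤ prev,
        (full.drop start).take (prev + 1 - start)
          = (full.drop start).take (prev - start) ++ [c] := by
      intro _
      have hlt : prev - start < (full.drop start).length := by
        simp [List.length_drop]; omega
      have : prev + 1 - start = (prev - start) + 1 := by omega
      rw [this, List.take_add_one]
      have : (full.drop start)[prev - start]? = some c := by
        rw [List.getElem?_drop, show start + (prev - start) = prev by omega,
          List.getElem?_eq_getElem hprev, hget]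
      simp [this]
    simp only [pvCutsAbs, pvSegs]
    split_ifs with h1 h2 h3
    · rw [show ((prev : Int) + 1) = ((prev + 1 : Nat) : Int) by push_cast; ring]
      rw [ih (prev + 1) start (d + 1) pairs hd1.symm (by omega), hgrow hs, h1]
    · rw [show ((prev : Int) + 1) = ((prev + 1 : Nat) : Int) by push_cast; ring]
      rw [ih (prev + 1) start (d - 1) pairs hd1.symm (by omega), hgrow hs, h2]
    · rw [List.foldl_cons]
      simp only [pvStepB2]
      rw [show ((prev : Int) + 1) = ((prev + 1 : Nat) : Int) by push_cast; ring]
      rw [ih (prev + 1) (prev + 1) d _ hd1.symm (by omega)]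
      simp [PySem.List.slice_natCast]
    · rw [show ((prev : Int) + 1) = ((prev + 1 : Nat) : Int) by push_cast; ring]
      rw [ih (prev + 1) start d pairs hd1.symm (by omega), hgrow hs]

-- ===== VERDICT (by name: the statement is the Claim_ definition above) =====
theorem split_table_pairs_py_spec : Claim_equal_split_table_pairs_py := by
  intro inner _
  show split_table_pairs_py inner = split_table_pairs_py_alt inner
  have hA : split_table_pairs_py inner = pvSegs [] 0 inner.toList := by
    unfold split_table_pairs_py
    rw [pvA_char inner.toList [] [] 0]
    simp
  have hB := pvB2_char inner.toList inner.toList 0 0 0 [] rfl (le_refl 0)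
  simp only [Nat.cast_zero, Nat.sub_self, List.take_zero, List.drop_zero,
    List.nil_append] at hB
  unfold split_table_pairs_py_alt
  show split_table_pairs_py inner =
    pvFinB inner.toList (List.foldl (pvStepB2 inner.toList) (0, [])
      ((List.foldl pvStepB1 (0, []) (PySem.List.enumerate inner.toList 0)).2))
  rw [pvB1_char inner.toList 0 0 []]
  simp only [List.nil_append]
  rw [hB, hA]
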